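-- pv_equiv track=rewrite | github.com/ArchipelagoMW/Archipelago | worlds/pokemon_bw/ndspy/soundSequence.py | _lengthOfVariableLengthInt
-- ===== SOURCE A (Python) =====
-- def _lengthOfVariableLengthInt(x):
--     """
--     Returns the length of a variable-length integer `x`, as encoded in
--     SSEQ. See _readVariableLengthInt() for a description of the format.
--     This can be implemented more concisely, but I opted for readability.
--     """
--     if x < 0:
--         raise ValueError(f'Cannot write a negative variable-length int: {x}')
--     bits = x.bit_length()
--     length = 0
--     while bits > 0:
--         length += 1
--         bits -= 7
--     return max(1, length)
-- ===== SOURCE B (Python) =====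
-- def _lengthOfVariableLengthInt(x):
--     if x < 0:
--         raise ValueError(f'Cannot write a negative variable-length int: {x}')
--     return max(1, (x.bit_length() + 6) // 7)
-- ===== Notes on version B (the rewrite author's own statement) =====
-- stated objective: simpler
-- what changed: Replaced the counting loop that subtracts seven bits per iteration with a single closed-form ceiling division of the bit length by seven, keeping the minimum length of one.
import Mathlib
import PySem

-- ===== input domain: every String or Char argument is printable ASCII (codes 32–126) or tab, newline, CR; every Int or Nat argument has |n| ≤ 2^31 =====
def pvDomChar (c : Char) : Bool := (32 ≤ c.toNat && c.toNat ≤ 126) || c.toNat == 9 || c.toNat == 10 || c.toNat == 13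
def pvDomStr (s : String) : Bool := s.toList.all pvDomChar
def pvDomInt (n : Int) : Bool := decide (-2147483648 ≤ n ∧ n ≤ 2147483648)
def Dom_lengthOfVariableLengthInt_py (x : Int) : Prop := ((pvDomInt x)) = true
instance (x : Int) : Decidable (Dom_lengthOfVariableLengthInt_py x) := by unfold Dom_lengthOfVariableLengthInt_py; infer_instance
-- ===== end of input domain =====

-- B replaces A's subtract-7 counting loop by the closed form max(1, (bit_length+6)//7); return values proved equal for x ≥ 0 (A raises ValueError for x < 0).

-- ===== PORT A =====
-- Python's int.bit_length() for a nonnegative integer (zero for zero, one more than the floored base-two logarithm otherwise); exact on x ≥ 0 (A raises before calling it on negatives).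
def pyBitLength (n : Nat) : Nat := if n = 0 then 0 else n.log2 + 1

-- the while loop: `while bits > 0: length += 1; bits -= 7`
def pvLoopA (bits : Nat) : Int :=
  if bits = 0 then 0 else 1 + pvLoopA (bits - 7)
decreasing_by omega

def lengthOfVariableLengthInt_py (x : Int) : Int :=
  -- `if x < 0: raise ValueError` is excluded by Pre_; sentinel value outside it
  if x < 0 then 0
  else max 1 (pvLoopA (pyBitLength x.toNat))

-- ===== PORT B =====
def lengthOfVariableLengthInt_py_alt (x : Int) : Int :=
  if x < 0 then 0
  else max 1 (PySem.Int.floordiv ((pyBitLength x.toNat : Int) + 6) 7)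

-- ===== PRECONDITION & SPEC =====
-- Pre_ excludes exactly x < 0, where A raises ValueError.
def Pre_lengthOfVariableLengthInt_py (x : Int) : Prop := 0 ≤ x
instance (x : Int) : Decidable (Pre_lengthOfVariableLengthInt_py x) := by unfold Pre_lengthOfVariableLengthInt_py; infer_instance
def pvWitness_lengthOfVariableLengthInt_py : Int := 300

def Spec_lengthOfVariableLengthInt_py (x : Int) (out : Int) : Prop := out = lengthOfVariableLengthInt_py_alt x
instance (x : Int) (out : Int) : Decidable (Spec_lengthOfVariableLengthInt_py x out) := by unfold Spec_lengthOfVariableLengthInt_py; infer_instance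

-- ===== CLAIM (what is proved, stated in full; the proofs are below) =====
def Claim_equal_lengthOfVariableLengthInt_py : Prop := ∀ (x : Int), Dom_lengthOfVariableLengthInt_py x → Pre_lengthOfVariableLengthInt_py x → Spec_lengthOfVariableLengthInt_py x (lengthOfVariableLengthInt_py x)

-- ===== LEMMAS AND PROOFS =====
theorem pvLoopA_eq (b : Nat) : pvLoopA b = ((b + 6) / 7 : Nat) := by
  induction b using Nat.strong_induction_on with
  | _ b ih =>
    rw [pvLoopA]
    by_cases h : b = 0
    · simp [h]
    · rw [if_neg h, ih (b - 7) (by omega)]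
      push_cast
      omega

-- ===== VERDICT (by name: the statement is the Claim_ definition above) =====
theorem lengthOfVariableLengthInt_py_spec : Claim_equal_lengthOfVariableLengthInt_py := by
  intro x _ hx
  unfold Pre_lengthOfVariableLengthInt_py at hx
  unfold Spec_lengthOfVariableLengthInt_py lengthOfVariableLengthInt_py lengthOfVariableLengthInt_py_alt
  rw [if_neg (by omega), if_neg (by omega), pvLoopA_eq]
  have : ((pyBitLength x.toNat : Int) + 6) = ((pyBitLength x.toNat + 6 : Nat) : Int) := by push_cast; ring
  rw [this]
  rw [show (7 : Int) = ((7 : Nat) : Int) from rfl, PySem.Int.floordiv_natCast]
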